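-- pv_equiv track=rewrite | github.com/eurnie/AdventOfCode | 2015/02/puzzle2.py | lengthSmallestSides
-- ===== SOURCE A (Python) =====
-- import copy
--
-- def lengthSmallestSides(list):
-- 	smallest = list[0]
-- 	for elem in list:
-- 		if (elem < smallest):
-- 			smallest = elem
--
-- 	secondList = copy.deepcopy(list)
-- 	secondList.remove(smallest)
-- 	secondSmallest = secondList[0]
-- 	for elem in secondList:
-- 		if (elem < secondSmallest):
-- 			secondSmallest = elem
--
-- 	return (smallest+smallest+secondSmallest+secondSmallest)
-- ===== SOURCE B (Python) =====
-- def lengthSmallestSides(list):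
--     s = sorted(list)
--     return 2 * (s[0] + s[1])
-- ===== Notes on version B (the rewrite author's own statement) =====
-- stated objective: simpler
-- what changed: Replaces the two linear min-scans with a deepcopy-and-remove in between by a single sort of a copy and constant-index access to the two smallest elements.
import Mathlib
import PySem

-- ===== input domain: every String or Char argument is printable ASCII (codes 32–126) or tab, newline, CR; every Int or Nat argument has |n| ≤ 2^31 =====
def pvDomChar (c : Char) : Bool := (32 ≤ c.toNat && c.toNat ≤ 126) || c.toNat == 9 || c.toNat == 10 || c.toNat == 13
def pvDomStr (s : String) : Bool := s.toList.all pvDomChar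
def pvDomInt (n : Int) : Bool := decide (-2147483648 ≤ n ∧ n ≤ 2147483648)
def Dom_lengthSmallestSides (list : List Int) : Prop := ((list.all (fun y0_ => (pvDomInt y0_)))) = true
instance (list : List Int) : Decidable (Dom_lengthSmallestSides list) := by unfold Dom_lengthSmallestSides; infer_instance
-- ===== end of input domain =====

-- B replaces A's two min-scans (with a deepcopy-and-remove in between) by sorting a copy and reading the two smallest elements; objective: simpler.


-- ===== PORT A =====
-- literal port of A: first min-scan seeded with list[0], remove the minimum (first occurrence),
-- second min-scan seeded with secondList[0]; .getD defaults are unreachable under Pre_ (length ≥ 2)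
def lengthSmallestSides (list : List Int) : Int :=
  let smallest0 := (PySem.List.pyGet? list 0).getD 0
  let smallest := list.foldl (fun s e => if e < s then e else s) smallest0
  let secondList := (PySem.List.remove? list smallest).getD []
  let secondSmallest0 := (PySem.List.pyGet? secondList 0).getD 0
  let secondSmallest := secondList.foldl (fun s e => if e < s then e else s) secondSmallest0
  smallest + smallest + secondSmallest + secondSmallest

-- ===== PORT B =====
-- literal port of Source B: sort, then index; .getD defaults unreachable under Pre_
def lengthSmallestSides_alt (list : List Int) : Int :=
  let s := PySem.List.sorted list (fun x => x) false
  2 * ((PySem.List.pyGet? s 0).getD 0 + (PySem.List.pyGet? s 1).getD 0)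

-- ===== PRECONDITION & SPEC =====
-- A raises IndexError on lists of length < 2 (list[0] on [], secondList[0] after removing the
-- only element of a singleton); B raises there too. Pre_ excludes exactly those inputs.
def Pre_lengthSmallestSides (list : List Int) : Prop := 2 ≤ list.length
instance (list : List Int) : Decidable (Pre_lengthSmallestSides list) := by unfold Pre_lengthSmallestSides; infer_instance
def pvWitness_lengthSmallestSides : List Int := [3, 1, 2]
def Spec_lengthSmallestSides (list : List Int) (out : Int) : Prop := out = lengthSmallestSides_alt list
instance (list : List Int) (out : Int) : Decidable (Spec_lengthSmallestSides list out) := by unfold Spec_lengthSmallestSides; infer_instance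

-- ===== CLAIM (what is proved, stated in full; the proofs are below) =====
def Claim_equal_lengthSmallestSides : Prop := ∀ (list : List Int), Dom_lengthSmallestSides list → Pre_lengthSmallestSides list → Spec_lengthSmallestSides list (lengthSmallestSides list)

-- ===== LEMMAS AND PROOFS =====

-- A's scan body is 'min'
theorem ifFold_eq_min : (fun (s e : Int) => if e < s then e else s) = (fun s e : Int => min s e) := by
  funext s e
  rcases lt_or_ge e s with h | h
  · simp [h, min_eq_right h.le]
  · simp [not_lt.mpr h, min_eq_left h]

-- A's loop over h :: t seeded with h computes min(h :: t)
theorem scan_eq_min? (h : Int) (t : List Int) :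
    PySem.List.min? (h :: t) (fun y => y) =
      some ((h :: t).foldl (fun s e => if e < s then e else s) h) := by
  rw [PySem.List.min?_id_cons, ifFold_eq_min]
  simp [List.foldl_cons]

-- ===== VERDICT =====
theorem lengthSmallestSides_spec : Claim_equal_lengthSmallestSides := by
  intro xs _ hpre
  unfold Spec_lengthSmallestSides lengthSmallestSides lengthSmallestSides_alt
  unfold Pre_lengthSmallestSides at hpre
  -- xs is nonempty
  obtain ⟨h, t, rfl⟩ : ∃ h t, xs = h :: t := by
    cases xs with
    | nil => simp at hpre
    | cons h t => exact ⟨h, t, rfl⟩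
  -- the sorted list has at least two elements
  have hslen : (PySem.List.sorted (h :: t) (fun x => x) false).length = (h :: t).length :=
    PySem.List.length_sorted _ _ _
  obtain ⟨a, b, r, hs⟩ : ∃ a b r,
      PySem.List.sorted (h :: t) (fun x => x) false = a :: b :: r := by
    obtain ⟨a, u, ha⟩ := List.exists_cons_of_ne_nil
      (show PySem.List.sorted (h :: t) (fun x => x) false ≠ [] by
        intro hnil; rw [hnil] at hslen; simp at hslen)
    obtain ⟨b, r, hb⟩ := List.exists_cons_of_ne_nil
      (show u ≠ [] by
        intro hnil; rw [ha, hnil] at hslen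
        simp only [List.length_cons, List.length_nil] at hslen hpre; omega)
    exact ⟨a, b, r, by rw [ha, hb]⟩
  have hperm : (a :: b :: r).Perm (h :: t) := hs ▸ PySem.List.sorted_perm _ _ _
  -- A's first scan computes the minimum m
  set m := (h :: t).foldl (fun s e => if e < s then e else s) h with hm
  have hmin : PySem.List.min? (h :: t) (fun y => y) = some m := scan_eq_min? h t
  have hm_mem : m ∈ h :: t := PySem.List.min?_mem hmin
  have hm_le : ∀ y ∈ h :: t, m ≤ y := by
    intro y hy; exact PySem.List.min?_isMin hmin y hy
  -- the sorted head a is also the minimum, so m = a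
  have ha_le : ∀ y ∈ h :: t, a ≤ y := PySem.List.key_head_sorted_le _ _ hs
  have ha_mem : a ∈ h :: t := hperm.mem_iff.mp (by simp)
  have hma : m = a := le_antisymm (hm_le a ha_mem) (ha_le m hm_mem)
  -- secondList = (h :: t).erase m, a permutation of b :: r
  have hrem : PySem.List.remove? (h :: t) m = some ((h :: t).erase m) :=
    PySem.List.remove?_eq_some_erase _ m hm_mem
  have heperm : ((h :: t).erase m).Perm (b :: r) := by
    have : ((a :: b :: r).erase m).Perm ((h :: t).erase m) := hperm.erase m
    have hhead : (a :: b :: r).erase m = b :: r := by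
      rw [hma]; simp [List.erase_cons_head]
    exact (hhead ▸ this).symm
  obtain ⟨eh, et, he⟩ : ∃ eh et, (h :: t).erase m = eh :: et := by
    obtain ⟨eh, et, hE⟩ := List.exists_cons_of_ne_nil
      (show (h :: t).erase m ≠ [] by
        intro hnil; rw [hnil] at heperm; exact absurd heperm.length_eq (by simp))
    exact ⟨eh, et, hE⟩
  -- A's second scan computes the minimum m2 of secondList
  set m2 := (eh :: et).foldl (fun s e => if e < s then e else s) eh with hm2
  have hmin2 : PySem.List.min? (eh :: et) (fun y => y) = some m2 := scan_eq_min? eh et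
  have hm2_mem : m2 ∈ eh :: et := PySem.List.min?_mem hmin2
  have hm2_le : ∀ y ∈ eh :: et, m2 ≤ y := by
    intro y hy; exact PySem.List.min?_isMin hmin2 y hy
  -- b is the minimum of b :: r (sorted order), so m2 = b
  have hpw : (a :: b :: r).Pairwise (fun x y : Int => x ≤ y) := by
    have := PySem.List.sorted_pairwise (xs := h :: t) (key := fun x : Int => x)
    rwa [hs] at this
  have hb_le : ∀ y ∈ b :: r, b ≤ y := by
    intro y hy
    rw [List.mem_cons] at hy
    rcases hy with rfl | hy
    · exact le_refl _
    · exact (List.pairwise_cons.mp (List.pairwise_cons.mp hpw).2).1 y hy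
  have hm2b : m2 = b := by
    refine le_antisymm ?_ ?_
    · exact hm2_le b (he ▸ heperm.symm.mem_iff.mp (by simp))
    · exact hb_le m2 (heperm.mem_iff.mp (he ▸ hm2_mem))
  -- assemble
  simp only [hs]
  have hg0 : (PySem.List.pyGet? (h :: t) 0).getD 0 = h := by
    simp [PySem.List.pyGet?, PySem.List.pyIdx?]
  rw [hg0, ← hm, hrem]
  simp only [Option.getD_some]
  rw [he]
  have hg1 : (PySem.List.pyGet? (eh :: et) 0).getD 0 = eh := by
    simp [PySem.List.pyGet?, PySem.List.pyIdx?]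
  rw [hg1, ← hm2, hma, hm2b]
  have hge : (0:Int) ≤ (r.length : Int) + 1 := by positivity
  have hg0' : (PySem.List.pyGet? (a :: b :: r) 0).getD 0 = a := by
    simp [PySem.List.pyGet?, PySem.List.pyIdx?, hge]
  have hg1' : (PySem.List.pyGet? (a :: b :: r) 1).getD 0 = b := by
    simp [PySem.List.pyGet?, PySem.List.pyIdx?]
  rw [hg0', hg1']
  ring
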